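-- pv_equiv track=rewrite | github.com/humancipher/Programming_Contest | Programming_Contest/AtCoder/ABC/ABC_001-099/ABC_030-039/ABC_031/ABC_031_C.py | solve
-- ===== SOURCE A (Python) =====
-- INF = 2501
--
-- def solve(A,N):
--     taka_ans = -INF
--     for i in range(N): #高橋の選択
--         taka_tmp = 0
--         taka,aoki = 0,0
--         aoki_max = -INF
--         for j in range(N): #青木の選択
--             if i == j:
--                 continue
--             else:
--                 taka,aoki = 0,0
--                 for k in range(min(i,j),max(i,j)+1):
--                     if (k - min(i,j)) % 2 == 0:
--                         taka += A[k]
--                     else: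
--                         aoki += A[k]
--                 if aoki_max < aoki:
--                     aoki_max = aoki
--                     taka_tmp = taka
--         taka_ans = max(taka_ans,taka_tmp)
--     return taka_ans
-- ===== SOURCE B (Python) =====
-- INF = 2501
--
-- def solve(A, N):
--     # parity-split prefix sums: ev[t]/od[t] = sum of A[k] for k < t with k even/odd
--     ev = [0]
--     od = [0]
--     for k in range(len(A)):
--         ev.append(ev[-1] + (A[k] if k % 2 == 0 else 0))
--         od.append(od[-1] + (A[k] if k % 2 == 1 else 0))
--     taka_ans = -INF
--     for i in range(N):
--         taka_tmp = 0
--         aoki_max = -INF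
--         for j in range(N):
--             if i == j:
--                 continue
--             l, r = (i, j) if i < j else (j, i)
--             e = ev[r + 1] - ev[l]
--             o = od[r + 1] - od[l]
--             taka, aoki = (e, o) if l % 2 == 0 else (o, e)
--             if aoki_max < aoki:
--                 aoki_max = aoki
--                 taka_tmp = taka
--         taka_ans = max(taka_ans, taka_tmp)
--     return taka_ans
-- ===== Notes on version B (the rewrite author's own statement) =====
-- stated objective: faster
-- what changed: B precomputes parity-split prefix sums once so each (i,j) pair's Takahashi/Aoki segment sums are two O(1) prefix differences instead of A's O(N) inner re-summation loop; intended as faster (a timing run measured ~30x at n=1024, the largest size both finished; unconfirmed at larger sizes).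
import Mathlib
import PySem

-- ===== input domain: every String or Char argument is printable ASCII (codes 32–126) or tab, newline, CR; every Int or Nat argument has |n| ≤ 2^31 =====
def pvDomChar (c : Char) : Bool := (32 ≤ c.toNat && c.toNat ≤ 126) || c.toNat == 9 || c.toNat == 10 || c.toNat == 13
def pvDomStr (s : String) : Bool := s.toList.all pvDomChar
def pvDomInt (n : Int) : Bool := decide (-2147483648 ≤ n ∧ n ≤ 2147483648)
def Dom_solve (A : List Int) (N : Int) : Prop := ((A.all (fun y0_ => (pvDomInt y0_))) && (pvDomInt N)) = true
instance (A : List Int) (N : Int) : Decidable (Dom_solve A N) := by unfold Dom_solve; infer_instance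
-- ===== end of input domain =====

-- B replaces A's inner segment re-summation by parity-split prefix sums (one prefix-difference per pair); intended as faster (timing run measured ~30x at n=1024, unconfirmed at larger sizes).

-- ===== PORT A =====
def solve (A : List Int) (N : Int) : Int :=
  (PySem.List.pyRange 0 N 1).foldl (fun taka_ans i =>
    let inner := (PySem.List.pyRange 0 N 1).foldl (fun (s : Int × Int) j =>
      -- s = (taka_tmp, aoki_max)
      if i = j then s
      else
        let ta := (PySem.List.pyRange (min i j) (max i j + 1) 1).foldl
          (fun (p : Int × Int) k =>
            if PySem.Int.mod (k - min i j) 2 = 0 then (p.1 + PySem.List.pyGetD A k 0, p.2)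
            else (p.1, p.2 + PySem.List.pyGetD A k 0)) (0, 0)
        if s.2 < ta.2 then (ta.1, ta.2) else s) (0, -2501)
    max taka_ans inner.1) (-2501)

-- ===== PORT B =====
def solve_alt (A : List Int) (N : Int) : Int :=
  let pre := (PySem.List.pyRange 0 (A.length : Int) 1).foldl (fun (p : List Int × List Int) k =>
      (p.1 ++ [PySem.List.pyGetD p.1 (-1) 0 +
                 (if PySem.Int.mod k 2 = 0 then PySem.List.pyGetD A k 0 else 0)],
       p.2 ++ [PySem.List.pyGetD p.2 (-1) 0 +
                 (if PySem.Int.mod k 2 = 1 then PySem.List.pyGetD A k 0 else 0)]))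
    ([0], [0])
  let ev := pre.1
  let od := pre.2
  (PySem.List.pyRange 0 N 1).foldl (fun taka_ans i =>
    let inner := (PySem.List.pyRange 0 N 1).foldl (fun (s : Int × Int) j =>
      if i = j then s
      else
        let l := if i < j then i else j
        let r := if i < j then j else i
        let e := PySem.List.pyGetD ev (r + 1) 0 - PySem.List.pyGetD ev l 0
        let o := PySem.List.pyGetD od (r + 1) 0 - PySem.List.pyGetD od l 0
        let ta := if PySem.Int.mod l 2 = 0 then (e, o) else (o, e)
        if s.2 < ta.2 then (ta.1, ta.2) else s) (0, -2501)
    max taka_ans inner.1) (-2501)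

-- ===== PRECONDITION & SPEC =====
-- Pre_ excludes exactly the inputs where A raises IndexError: N ≥ 2 with fewer than N list elements.
def Pre_solve (A : List Int) (N : Int) : Prop := N ≤ (A.length : Int) ∨ N ≤ 1
instance (A : List Int) (N : Int) : Decidable (Pre_solve A N) := by unfold Pre_solve; infer_instance
def pvWitness_solve : List Int × Int := ([3, -1, 4, 1], 4)

def Spec_solve (A : List Int) (N : Int) (out : Int) : Prop := out = solve_alt A N
instance (A : List Int) (N : Int) (out : Int) : Decidable (Spec_solve A N out) := by unfold Spec_solve; infer_instance

-- ===== CLAIM (what is proved, stated in full; the proofs are below) =====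
def Claim_equal_solve : Prop := ∀ (A : List Int) (N : Int), Dom_solve A N → Pre_solve A N → Spec_solve A N (solve A N)

-- ===== LEMMAS AND PROOFS =====

def Epre (A : List Int) : Nat → Int
  | 0 => 0
  | t+1 => Epre A t + (if (t : Int) % 2 = 0 then PySem.List.pyGetD A (t : Int) 0 else 0)

def Opre (A : List Int) : Nat → Int
  | 0 => 0
  | t+1 => Opre A t + (if (t : Int) % 2 = 1 then PySem.List.pyGetD A (t : Int) 0 else 0)

theorem pre_build (A : List Int) (n : Nat) :
    (PySem.List.pyRange 0 (n : Int) 1).foldl (fun (p : List Int × List Int) k =>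
      (p.1 ++ [PySem.List.pyGetD p.1 (-1) 0 +
                 (if PySem.Int.mod k 2 = 0 then PySem.List.pyGetD A k 0 else 0)],
       p.2 ++ [PySem.List.pyGetD p.2 (-1) 0 +
                 (if PySem.Int.mod k 2 = 1 then PySem.List.pyGetD A k 0 else 0)]))
      ([0], [0])
    = ((List.range (n+1)).map (Epre A), (List.range (n+1)).map (Opre A)) := by
  induction n with
  | zero => simp [PySem.List.pyRange_one_eq_nil, Epre, Opre]
  | succ m ih =>
    have h1 : ((m : Int) + 1) = (((m+1 : Nat)) : Int) := by push_cast; ring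
    rw [show ((m+1 : Nat) : Int) = (m : Int) + 1 by push_cast; ring,
        PySem.List.pyRange_one_succ_right (by positivity), List.foldl_append, ih]
    simp only [List.foldl_cons, List.foldl_nil]
    rw [show (List.range (m+1)) = List.range m ++ [m] from List.range_succ]
    simp only [List.map_append, List.map_cons, List.map_nil,
      PySem.List.pyGetD_neg_one_append_singleton,
      PySem.Int.mod_eq_emod_of_pos (by norm_num : (0:Int) < 2)]
    rw [show (List.range (m+1+1)) = List.range (m+1) ++ [m+1] from List.range_succ,
        show (List.range (m+1)) = List.range m ++ [m] from List.range_succ]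
    simp [Epre, Opre]

theorem pre_lookup_E (A : List Int) (t n : Nat) (h : t ≤ n) :
    PySem.List.pyGetD ((List.range (n+1)).map (Epre A)) (t : Int) 0 = Epre A t := by
  rw [PySem.List.pyGetD_natCast]
  rw [List.getD_eq_getElem?_getD]
  simp [Nat.lt_succ_of_le h]

theorem pre_lookup_O (A : List Int) (t n : Nat) (h : t ≤ n) :
    PySem.List.pyGetD ((List.range (n+1)).map (Opre A)) (t : Int) 0 = Opre A t := by
  rw [PySem.List.pyGetD_natCast]
  rw [List.getD_eq_getElem?_getD]
  simp [Nat.lt_succ_of_le h]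

theorem seg_fold (A : List Int) (l d : Nat) :
    (PySem.List.pyRange (l : Int) ((l : Int) + (d : Int) + 1) 1).foldl
      (fun (p : Int × Int) k =>
        if PySem.Int.mod (k - (l : Int)) 2 = 0 then (p.1 + PySem.List.pyGetD A k 0, p.2)
        else (p.1, p.2 + PySem.List.pyGetD A k 0)) (0, 0)
    = if (l : Int) % 2 = 0 then
        (Epre A (l + d + 1) - Epre A l, Opre A (l + d + 1) - Opre A l)
      else
        (Opre A (l + d + 1) - Opre A l, Epre A (l + d + 1) - Epre A l) := by
  induction d with
  | zero =>
    simp only [Nat.cast_zero, add_zero, PySem.List.pyRange_one_singleton,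
      List.foldl_cons, List.foldl_nil, sub_self]
    rw [PySem.Int.mod_eq_emod_of_pos (by norm_num : (0:Int) < 2)]
    simp only [Int.zero_emod, reduceIte]
    by_cases hp : (l : Int) % 2 = 0 <;>
      simp [hp, Epre, Opre]
  | succ m ih =>
    rw [show ((l : Int) + ((m+1 : Nat) : Int) + 1) = ((l : Int) + (m : Int) + 1) + 1 by
          push_cast; ring,
        PySem.List.pyRange_one_succ_right (by omega), List.foldl_append, ih]
    simp only [List.foldl_cons, List.foldl_nil]
    rw [PySem.Int.mod_eq_emod_of_pos (by norm_num : (0:Int) < 2)]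
    have hc : (l : Int) + (m : Int) + 1 = (((l + m + 1 : Nat)) : Int) := by push_cast; ring
    rw [hc]
    have hE : Epre A (l + (m+1) + 1) = Epre A (l + m + 1) +
        (if ((l + m + 1 : Nat) : Int) % 2 = 0 then PySem.List.pyGetD A ((l + m + 1 : Nat) : Int) 0 else 0) := by
      show Epre A ((l + m + 1) + 1) = _; rw [Epre]
    have hO : Opre A (l + (m+1) + 1) = Opre A (l + m + 1) +
        (if ((l + m + 1 : Nat) : Int) % 2 = 1 then PySem.List.pyGetD A ((l + m + 1 : Nat) : Int) 0 else 0) := by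
      show Opre A ((l + m + 1) + 1) = _; rw [Opre]
    have hcond : ((l + m + 1 : Nat) : Int) - (l : Int) = (m : Int) + 1 := by push_cast; ring
    rw [hcond, hE, hO]
    by_cases hp : (l : Int) % 2 = 0 <;> by_cases hm : ((m : Int) + 1) % 2 = 0 <;>
      simp only [hp, hm, if_true, if_false] <;>
      split_ifs <;>
      first
      | (exfalso; omega)
      | (simp only [Prod.mk.injEq]; constructor <;> ring)

theorem main_eq (A : List Int) (n : Nat) (hlen : n ≤ A.length ∨ n ≤ 1) :
    solve A (n : Int) = solve_alt A (n : Int) := by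
  simp only [solve, solve_alt]
  rw [show (A.length : Int) = ((A.length : Nat) : Int) from rfl, pre_build A A.length]
  apply PySem.List.foldl_congr_mem
  intro acc i hi
  rw [PySem.List.mem_pyRange_one] at hi
  congr 2
  apply PySem.List.foldl_congr_mem
  intro s j hj
  rw [PySem.List.mem_pyRange_one] at hj
  by_cases hij : i = j
  · simp [hij]
  · simp only [hij, reduceIte]
    have hlt : min i j < max i j := min_lt_max.mpr hij
    have h0 : 0 ≤ min i j := by omega
    have hne : i ≠ j := hij
    have hmax : (max i j : Int) < (A.length : Int) := by omega
    rw [show min i j = ((min i j).toNat : Int) from by omega,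
        show max i j + 1 = ((min i j).toNat : Int) + ((max i j - min i j).toNat : Int) + 1 from by omega,
        seg_fold A (min i j).toNat (max i j - min i j).toNat]
    rw [show (if i < j then i else j) = ((min i j).toNat : Int) from by split <;> omega,
        show (if i < j then j else i) + 1 = (((min i j).toNat + (max i j - min i j).toNat + 1 : Nat) : Int) from by push_cast; split <;> omega]
    rw [pre_lookup_E A _ A.length (by omega), pre_lookup_E A _ A.length (by omega),
        pre_lookup_O A _ A.length (by omega), pre_lookup_O A _ A.length (by omega)]
    try rw [PySem.Int.mod_eq_emod_of_pos (by norm_num : (0:Int) < 2)]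


-- ===== VERDICT (by name: the statement is the Claim_ definition above) =====
theorem solve_spec : Claim_equal_solve := by
  intro A N _ hpre
  unfold Spec_solve
  unfold Pre_solve at hpre
  by_cases h : 0 ≤ N
  · rw [show N = (N.toNat : Int) by omega]; exact main_eq A N.toNat (by omega)
  · simp only [solve, solve_alt, PySem.List.pyRange_one_eq_nil (by omega : N ≤ 0), List.foldl_nil]
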